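-- pv_equiv track=rewrite | github.com/TeamLab/lab_for_gachon_cs50 | reverse_before_after_same_number/reverse_before_after_same_number.py | create_odd_number_method
-- ===== SOURCE A (Python) =====
-- def create_odd_number_method(number):
--     # '''
--     # Input :
--     #   -1이상의 정수형 숫자
--     # Output :
--     #   -숫자의 길이가 홀수인 숫자들중 가운대를 기준으로 뒤집었을 때 똑같은 숫자
--     #   -숫자의 길이가 짝수다. ex) 3, 211, 12345    >> len("3") = 1   len("211") = 3 len("12345") = 5
--     #   -가운대 숫자를 기준으로 뒤집었을 때 똑같은 숫자다. ex) 212, 42324, 55255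
--     #    1. 212를 가운대 숫자(1)를 기준으로 나눠서(2,2) 한숫자를 뒤집었을때 똑같다.
--     #    2. 42324 가운대 숫자(1)를 기준으로 나눠서(42,24) 한숫자를 뒤집었을때(42,42) 똑같다.
--     #    3. 123454321 가운대 숫자(5)를 기준으로 나눠서(1234,4321) 한숫자를 뒤집었을때(1234,1234) 똑같다.
--     #   - 위의 조건을 만족하는 숫자들을 1차원 리스트 형태로 반환
--     # Examples :
--     #   >>>import reverse_before_after_same_number as rbasn
--     #   >>>rbasn.create_odd_number_method(9)
--     #   [1, 2, 3, 4, 5, 6, 7, 8, 9]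
--     #   >>>rbasn.create_odd_number_method(15)
--     #   [1, 2, 3, 4, 5, 6, 7, 8, 9]
--     #   >>>rbasn.create_odd_number_method(100)
--     #   [1, 2, 3, 4, 5, 6, 7, 8, 9]
--     #   >>>rbasn.create_odd_number_method(500)
--     #   [1, 2, 3, 4, 5, 6, 7, 8, 9, 101, 111, 121, 131, 141, 151, 161, 171, 181, 191, 202, 212, 222, 232, 242, 252, 262\
--     #   ,272, 282, 292, 303, 313, 323, 333, 343, 353, 363, 373, 383, 393, 404, 414, 424, 434, 444, 454, 464, 474, 484\
--     #   , 494]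
--     # '''
--     odd_number_list = []
--     for num in range(1,number+1):
--         len_of_number_remain = len(str(num))%2
--         len_of_number_share = len(str(num))//2
--         if len_of_number_remain == 1:
--             if len_of_number_share == 0 :
--                 len_of_number_share = 1
--             count_method = 0
--             for ct in range(0,len_of_number_share):
--                 if str(num)[ct]==str(num)[-1-ct]:
--                     count_method += 1
--                 if count_method == len_of_number_share:
--                     odd_number_list.append(num)
--     return odd_number_list
-- ===== SOURCE B (Python) =====
-- def create_odd_number_method(number):
--     # Generate odd-length decimal palindromes directly from their half-prefixes,
--     # block by block of growing half-width, instead of testing every number up to `number`.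
--     result = []
--     width = 1
--     while 10 ** (2 * width - 2) <= number:
--         for half in range(10 ** (width - 1), 10 ** width):
--             pal = half
--             t = half // 10
--             while t > 0:
--                 pal = pal * 10 + t % 10
--                 t //= 10
--             if pal <= number:
--                 result.append(pal)
--         width += 1
--     return result
-- ===== Notes on version B (the rewrite author's own statement) =====
-- stated objective: faster
-- what changed: A tests each successive number up to `number` with a per-digit string palindrome check; B instead generates the odd-length decimal palindromes directly, mirroring each half-prefix (arithmetically, no strings) block by block of growing half-width, keeping only those <= number.
import Mathlib
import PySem

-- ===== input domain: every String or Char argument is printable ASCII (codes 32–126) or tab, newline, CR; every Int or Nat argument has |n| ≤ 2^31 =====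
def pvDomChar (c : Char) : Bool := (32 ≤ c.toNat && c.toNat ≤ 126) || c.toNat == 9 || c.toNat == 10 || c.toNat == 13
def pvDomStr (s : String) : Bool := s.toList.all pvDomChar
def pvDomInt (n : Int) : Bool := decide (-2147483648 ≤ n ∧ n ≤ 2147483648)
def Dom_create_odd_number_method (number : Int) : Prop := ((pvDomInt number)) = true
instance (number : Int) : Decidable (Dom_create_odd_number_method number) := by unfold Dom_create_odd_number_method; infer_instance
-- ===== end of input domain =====

-- B generates odd-length decimal palindromes directly from their half-prefixes (mirroring each
-- half), block by block of growing width, instead of testing every number from 1 to `number`;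
-- a timing run measures B considerably faster at large sizes.


-- ===== PORT A =====
def create_odd_number_method (number : Int) : List Int :=
  (PySem.List.pyRange 1 (number + 1) 1).foldl (fun odd_number_list num =>
    let s := PySem.Int.toStr num
    let len_of_number_remain := PySem.Int.mod (PySem.Str.len s) 2
    let len_of_number_share := PySem.Int.floordiv (PySem.Str.len s) 2
    if len_of_number_remain = 1 then
      let share := if len_of_number_share = 0 then 1 else len_of_number_share
      ((PySem.List.pyRange 0 share 1).foldl (fun (st : Int × List Int) ct =>
          let cnt := if PySem.Str.pyGet? s ct = PySem.Str.pyGet? s (-1 - ct) then st.1 + 1 else st.1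
          (cnt, if cnt = share then st.2 ++ [num] else st.2)) (0, odd_number_list)).2
    else odd_number_list) []

-- ===== PORT B =====
-- the inner `while t > 0` mirroring loop of Source B (fuel only makes the recursion structural;
-- fuel = t.toNat is enough since t strictly shrinks by a factor 10 each pass)
def pvMirrorGo : Nat → Int → Int → Int
  | 0, pal, _ => pal
  | fuel + 1, pal, t =>
    if 0 < t then pvMirrorGo fuel (pal * 10 + PySem.Int.mod t 10) (PySem.Int.floordiv t 10)
    else pal

-- the outer `while 10 ** (2*width-2) <= number` loop of Source B (fuel only makes the recursion
-- structural; widths with a true guard never exceed `number`)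
def pvAltLoop : Nat → Int → Int → List Int → List Int
  | 0, _, _, result => result
  | fuel + 1, number, width, result =>
    if (10 : Int) ^ (2 * width - 2).toNat ≤ number then
      pvAltLoop fuel number (width + 1)
        ((PySem.List.pyRange ((10 : Int) ^ (width - 1).toNat) ((10 : Int) ^ width.toNat) 1).foldl
          (fun acc half =>
            let pal := pvMirrorGo half.toNat half (PySem.Int.floordiv half 10)
            if pal ≤ number then acc ++ [pal] else acc) result)
    else result

def create_odd_number_method_alt (number : Int) : List Int :=
  pvAltLoop (number.toNat + 1) number 1 []

-- ===== PRECONDITION & SPEC =====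
def Spec_create_odd_number_method (number : Int) (out : List Int) : Prop := out = create_odd_number_method_alt number
instance (number : Int) (out : List Int) : Decidable (Spec_create_odd_number_method number out) := by unfold Spec_create_odd_number_method; infer_instance

-- ===== CLAIM (what is proved, stated in full; the proofs are below) =====
def Claim_equal_create_odd_number_method : Prop := ∀ (number : Int), Dom_create_odd_number_method number → Spec_create_odd_number_method number (create_odd_number_method number)

-- ===== LEMMAS AND PROOFS =====

-- the common specification both programs are reduced to: odd-length decimal palindromes
def pvIsPal (n : Int) : Bool :=
  ((Nat.digits 10 n.toNat).reverse == Nat.digits 10 n.toNat)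
    && ((Nat.digits 10 n.toNat).length % 2 == 1)

-- ---- bridge: Nat.toDigits (what str(num) prints) vs Nat.digits ----
theorem pv_toDigitsCore_eq (f : Nat) : ∀ (n : Nat) (l : List Char), n < f →
    Nat.toDigitsCore 10 f n l
      = (if n = 0 then ['0'] else ((Nat.digits 10 n).map Nat.digitChar).reverse) ++ l := by
  induction f with
  | zero => intro n l h; omega
  | succ f ih =>
    intro n l _
    simp only [Nat.toDigitsCore]
    by_cases h0 : n / 10 = 0
    · have hn : n < 10 := by omega
      rw [if_pos h0]
      by_cases hz : n = 0
      · subst hz; simp [Nat.digitChar]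
      · rw [if_neg hz]
        have : Nat.digits 10 n = [n] := by
          rw [Nat.digits_def' (by norm_num) (by omega), Nat.mod_eq_of_lt hn, h0]
          simp
        simp [this, Nat.mod_eq_of_lt hn]
    · rw [if_neg h0]
      have hd : n / 10 < f := by
        have := Nat.div_lt_self (by omega : 0 < n) (by norm_num : 1 < 10)
        omega
      rw [ih (n / 10) _ hd, if_neg h0]
      have : Nat.digits 10 n = (n % 10) :: Nat.digits 10 (n / 10) := by
        exact Nat.digits_def' (by norm_num) (by omega)
      rw [this, if_neg (by omega)]
      simp
theorem pv_toChars_pos (n : Int) (h : 1 ≤ n) :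
    PySem.Int.toChars n = ((Nat.digits 10 n.toNat).map Nat.digitChar).reverse := by
  have hn : ¬ n < 0 := by omega
  simp only [PySem.Int.toChars, if_neg hn]
  show Nat.toDigitsCore 10 (n.toNat + 1) n.toNat [] = _
  rw [pv_toDigitsCore_eq (n.toNat + 1) n.toNat [] (by omega), if_neg (by omega)]
  simp

-- ---- palindromicity transfers between char lists and digit lists ----
theorem pv_digitChar_inj : ∀ a < 10, ∀ b < 10, Nat.digitChar a = Nat.digitChar b → a = b := by decide
theorem pv_map_rev_iff (m : Nat) :
    (((Nat.digits 10 m).map Nat.digitChar).reverse = (Nat.digits 10 m).map Nat.digitChar)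
      ↔ (Nat.digits 10 m).reverse = Nat.digits 10 m := by
  constructor
  · intro h
    rw [← List.map_reverse] at h
    apply List.ext_getElem (by simp)
    intro i h1 h2
    have h3 := congrArg (fun t => t[i]?) h
    simp only [List.getElem?_map] at h3
    have h4 : i < (Nat.digits 10 m).reverse.length := h1
    rw [List.getElem?_eq_getElem h4, List.getElem?_eq_getElem h2] at h3
    simp only [Option.map_some] at h3
    have ha : (Nat.digits 10 m).reverse[i] ∈ Nat.digits 10 m := by
      simpa using List.getElem_mem h4
    have hb : (Nat.digits 10 m)[i] ∈ Nat.digits 10 m := List.getElem_mem h2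
    exact pv_digitChar_inj _ (Nat.digits_lt_base (by norm_num) ha) _
      (Nat.digits_lt_base (by norm_num) hb) (Option.some.inj h3)
  · intro h
    rw [← List.map_reverse, h]
theorem pv_half_pal (l : List Char) (k : Nat) (hl : l.length = 2 * k + 1) :
    (∀ i : Nat, i < k → l[i]? = l[2 * k - i]?) ↔ l.reverse = l := by
  constructor
  · intro h
    apply List.ext_getElem (by simp)
    intro i h1 h2
    have hi : i < l.length := by simpa using h1
    rw [List.getElem_reverse]
    rcases lt_trichotomy i k with hik | hik | hik
    · have := h i hik
      rw [List.getElem?_eq_getElem hi, List.getElem?_eq_getElem (by omega : 2*k - i < l.length)] at this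
      have h5 : l.length - 1 - i = 2 * k - i := by omega
      simp only [h5]
      exact (Option.some.inj this).symm
    · have h5 : l.length - 1 - i = i := by omega
      simp [h5]
    · have hj : 2 * k - i < k := by omega
      have := h (2*k - i) hj
      rw [List.getElem?_eq_getElem (by omega : 2*k - i < l.length),
          List.getElem?_eq_getElem (by omega : 2*k - (2*k - i) < l.length)] at this
      have h5 : l.length - 1 - i = 2 * k - i := by omega
      have h6 : 2 * k - (2*k - i) = i := by omega
      simp only [h5]
      rw [Option.some.injEq] at this
      exact this.trans (by congr 1)
  · intro h i hi
    have := congrArg (fun t => t[i]?) h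
    simp only at this
    rw [← this, List.getElem?_reverse (by omega : i < l.length)]
    congr 1
    omega

-- ---- A: the inner counting loop appends num exactly when all compared pairs match ----
theorem pv_inner (share : Int) (Q : Int → Prop) [DecidablePred Q] (num : Int) :
    ∀ (j c : Int) (l : List Int), 0 ≤ c → c ≤ j → j ≤ share →
    ((PySem.List.pyRange j share 1).foldl (fun (st : Int × List Int) ct =>
        (if Q ct then st.1 + 1 else st.1,
          if (if Q ct then st.1 + 1 else st.1) = share then st.2 ++ [num] else st.2)) (c, l)).2
      = if c = j ∧ j < share ∧ (∀ ct, j ≤ ct → ct < share → Q ct) then l ++ [num] else l := by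
  intro j c l hc hcj hjs
  generalize hgen : (share - j).toNat = n
  induction n generalizing j c l with
  | zero =>
    have hj : j = share := by omega
    subst hj
    rw [PySem.List.pyRange_one_eq_nil le_rfl]
    simp only [List.foldl_nil]
    rw [if_neg (by omega)]
  | succ n ih =>
    have hjlt : j < share := by omega
    rw [PySem.List.pyRange_one_cons hjlt]
    simp only [List.foldl_cons]
    set c' : Int := if Q j then c + 1 else c with hc'
    have hc'le : c' ≤ j + 1 := by rw [hc']; split_ifs <;> omega
    have hc'0 : 0 ≤ c' := by rw [hc']; split_ifs <;> omega
    rw [ih (j+1) c' _ hc'0 hc'le (by omega) (by omega)]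
    by_cases hq : Q j
    · have hc'' : c' = c + 1 := by rw [hc']; simp [hq]
      by_cases hcj' : c = j
      · by_cases hend : j + 1 = share
        · rw [if_pos (show c' = share by omega)]
          rw [if_neg (by rintro ⟨-, h2, -⟩; omega)]
          rw [if_pos ⟨hcj', hjlt, fun ct h1 h2 => by
            have hct : ct = j := by omega
            rw [hct]; exact hq⟩]
        · rw [if_neg (show ¬ c' = share by omega)]
          by_cases hall : ∀ ct, j + 1 ≤ ct → ct < share → Q ct
          · rw [if_pos ⟨by omega, by omega, hall⟩]
            rw [if_pos ⟨hcj', hjlt, fun ct h1 h2 => by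
              rcases eq_or_lt_of_le h1 with h | h
              · rw [← h]; exact hq
              · exact hall ct (by omega) h2⟩]
          · rw [if_neg (fun hx => hall (fun ct h1 h2 => hx.2.2 ct (by omega) h2)),
                if_neg (fun hx => hall (fun ct h1 h2 => hx.2.2 ct (by omega) h2))]
      · rw [if_neg (show ¬ c' = share by omega), if_neg (by rintro ⟨h1, -, -⟩; omega),
            if_neg (by rintro ⟨h1, -, -⟩; exact hcj' h1)]
    · have hc'' : c' = c := by rw [hc']; simp [hq]
      rw [if_neg (show ¬ c' = share by omega), if_neg (by rintro ⟨h1, -, -⟩; omega)]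
      by_cases hcj' : c = j
      · rw [if_neg (by rintro ⟨-, -, h3⟩; exact hq (h3 j le_rfl hjlt))]
      · rw [if_neg (by rintro ⟨h1, -, -⟩; exact hcj' h1)]

-- ---- A's loop body appends num iff num is an odd-length palindrome ----
theorem pv_cond_iff (l : List Char) (k : Nat) (hl : l.length = 2 * k + 1) (share : Int)
    (hsh : share = (max k 1 : Nat)) :
    (∀ ct : Int, 0 ≤ ct → ct < share → PySem.List.pyGet? l ct = PySem.List.pyGet? l (-1 - ct))
      ↔ l.reverse = l := by
  have hconv : ∀ i : Nat, i ≤ 2 * k → PySem.List.pyGet? l (i : Int) = l[i]? ∧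
      PySem.List.pyGet? l (-1 - (i : Int)) = l[2 * k - i]? := by
    intro i hi
    constructor
    · exact PySem.List.pyGet?_natCast l i
    · have h1 : (-1 - (i : Int)) = -((i + 1 : Nat) : Int) := by push_cast; ring
      rw [h1, PySem.List.pyGet?_neg_natCast l (i+1) (by omega) (by omega)]
      congr 1
      omega
  by_cases hk : k = 0
  · subst hk
    constructor
    · intro _
      rcases l with _ | ⟨a, _ | _⟩ <;> simp_all
    · intro hpal ct h0 hlt
      rw [hsh] at hlt
      simp only [Nat.zero_max, Nat.cast_one] at hlt
      have hct : ct = 0 := by omega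
      subst hct
      rcases l with _ | ⟨a, l'⟩
      · simp at hl
      · have hl' : l' = [] := by simpa using hl
        subst hl'
        show PySem.List.pyGet? [a] 0 = PySem.List.pyGet? [a] (-1 - 0)
        norm_num
        simp [PySem.List.pyGet?_neg_one]
  · have hmax : max k 1 = k := Nat.max_eq_left (by omega)
    rw [hmax] at hsh
    rw [← pv_half_pal l k hl]
    constructor
    · intro h i hi
      have hc := hconv i (by omega)
      rw [← hc.1, ← hc.2]
      exact h i (by omega) (by rw [hsh]; exact_mod_cast hi)
    · intro h ct h0 hlt
      rw [hsh] at hlt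
      have hi : ct.toNat < k := by omega
      have hc := hconv ct.toNat (by omega)
      have hct : (ct.toNat : Int) = ct := by omega
      rw [← hct, hc.1, hc.2]
      exact h ct.toNat hi
theorem pv_A_body (num : Int) (h1 : 1 ≤ num) (acc : List Int) :
    ((fun (odd_number_list : List Int) (num : Int) =>
      let s := PySem.Int.toStr num
      let len_of_number_remain := PySem.Int.mod (PySem.Str.len s) 2
      let len_of_number_share := PySem.Int.floordiv (PySem.Str.len s) 2
      if len_of_number_remain = 1 then
        let share := if len_of_number_share = 0 then 1 else len_of_number_share
        ((PySem.List.pyRange 0 share 1).foldl (fun (st : Int × List Int) ct =>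
            let cnt := if PySem.Str.pyGet? s ct = PySem.Str.pyGet? s (-1 - ct) then st.1 + 1 else st.1
            (cnt, if cnt = share then st.2 ++ [num] else st.2)) (0, odd_number_list)).2
      else odd_number_list) acc num)
      = (if pvIsPal num then acc ++ [num] else acc) := by
  have hchars := pv_toChars_pos num h1
  have hslist : (PySem.Int.toStr num).toList
      = ((Nat.digits 10 num.toNat).map Nat.digitChar).reverse := by
    rw [PySem.Int.toList_toStr, hchars]
  set ds := Nat.digits 10 num.toNat with hds
  have hne : ds ≠ [] := Nat.digits_ne_nil_iff_ne_zero.mpr (by omega)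
  set n := ds.length with hn
  have hn1 : 1 ≤ n := by
    rcases ds with _ | _
    · simp at hne
    · simp [hn]
  have hlen : PySem.Str.len (PySem.Int.toStr num) = (n : Int) := by
    simp only [PySem.Str.len_eq, hslist]
    simp [hn]
  simp only [hlen]
  have hmod : PySem.Int.mod (n : Int) 2 = ((n % 2 : Nat) : Int) := by
    exact_mod_cast PySem.Int.mod_natCast n 2
  have hdiv : PySem.Int.floordiv (n : Int) 2 = ((n / 2 : Nat) : Int) := by
    exact_mod_cast PySem.Int.floordiv_natCast n 2
  simp only [hmod, hdiv]
  by_cases hpar : n % 2 = 1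
  · rw [if_pos (by exact_mod_cast hpar)]
    set k := n / 2 with hk
    have hshare : (if ((k : Nat) : Int) = 0 then (1 : Int) else ((k : Nat) : Int))
        = ((max k 1 : Nat) : Int) := by
      split_ifs with h
      · have : k = 0 := by exact_mod_cast h
        simp [this]
      · have : k ≠ 0 := by intro hx; exact h (by exact_mod_cast hx)
        have : max k 1 = k := Nat.max_eq_left (by omega)
        rw [this]
    rw [hshare]
    rw [pv_inner (((max k 1 : Nat)) : Int)
      (fun ct => PySem.Str.pyGet? (PySem.Int.toStr num) ct
        = PySem.Str.pyGet? (PySem.Int.toStr num) (-1 - ct)) num 0 0 acc le_rfl le_rfl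
      (by positivity)]
    have hlform : ((ds.map Nat.digitChar).reverse).length = 2 * k + 1 := by
      simp [← hn, hk]
      omega
    have hcond := pv_cond_iff ((ds.map Nat.digitChar).reverse) k hlform ((max k 1 : Nat) : Int) rfl
    have hQiff : (∀ ct : Int, 0 ≤ ct → ct < ((max k 1 : Nat) : Int) →
        PySem.Str.pyGet? (PySem.Int.toStr num) ct = PySem.Str.pyGet? (PySem.Int.toStr num) (-1 - ct))
        ↔ ds.reverse = ds := by
      rw [show (∀ ct : Int, 0 ≤ ct → ct < ((max k 1 : Nat) : Int) →
          PySem.Str.pyGet? (PySem.Int.toStr num) ct = PySem.Str.pyGet? (PySem.Int.toStr num) (-1 - ct))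
          ↔ (∀ ct : Int, 0 ≤ ct → ct < ((max k 1 : Nat) : Int) →
          PySem.List.pyGet? ((ds.map Nat.digitChar).reverse) ct
            = PySem.List.pyGet? ((ds.map Nat.digitChar).reverse) (-1 - ct)) from by
        simp [hslist]]
      rw [hcond]
      rw [List.reverse_reverse]
      constructor
      · intro h
        exact (pv_map_rev_iff num.toNat).mp h.symm
      · intro h
        exact ((pv_map_rev_iff num.toNat).mpr h).symm
    by_cases hrev : ds.reverse = ds
    · rw [if_pos ⟨rfl, by positivity, hQiff.mpr hrev⟩, if_pos (by simp only [pvIsPal, Bool.and_eq_true, beq_iff_eq]; rw [← hds, ← hn]; exact ⟨hrev, by omega⟩)]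
    · rw [if_neg (fun hx => hrev (hQiff.mp hx.2.2)), if_neg (by simp only [pvIsPal, Bool.and_eq_true, beq_iff_eq, not_and]; rw [← hds]; exact fun h' => absurd h' hrev)]
  · rw [if_neg (fun hx => hpar (by exact_mod_cast hx)),
      if_neg (by simp only [pvIsPal, Bool.and_eq_true, beq_iff_eq, not_and]; rw [← hds, ← hn]; intro _; omega)]

theorem pv_A_filter (number : Int) :
    create_odd_number_method number = (PySem.List.pyRange 1 (number + 1) 1).filter pvIsPal := by
  unfold create_odd_number_method
  rw [PySem.List.foldl_congr_mem _ _ (fun acc num => if pvIsPal num then acc ++ [num] else acc) _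
    (fun acc num hmem => pv_A_body num (PySem.List.mem_pyRange_one.mp hmem).1 acc)]
  rw [PySem.List.foldl_append_if pvIsPal (fun x => x)]
  simp

-- ---- B: the mirroring loop in terms of digit lists ----
theorem pv_le_ten_pow (w : Int) : w ≤ (10 : Int) ^ (2 * w - 2).toNat := by
  rcases (by omega : w ≤ 0 ∨ 0 < w) with h | h
  · exact le_trans h (by positivity)
  · have h2 : (w.toNat - 1) < 2 ^ (w.toNat - 1) := Nat.lt_two_pow_self
    have h3 : (2 : Nat) ^ (w.toNat - 1) ≤ 10 ^ (w.toNat - 1) :=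
      Nat.pow_le_pow_left (by omega) _
    have h4 : (10 : Nat) ^ (w.toNat - 1) ≤ 10 ^ (2 * w - 2).toNat :=
      Nat.pow_le_pow_right (by omega) (by omega)
    have h5 : ((10 ^ (2 * w - 2).toNat : Nat) : Int) = (10 : Int) ^ (2 * w - 2).toNat := by
      push_cast; ring
    omega
theorem pv_len_bounds (x : Int) (hx : 1 ≤ x) :
    (10 : Int) ^ ((Nat.digits 10 x.toNat).length - 1) ≤ x ∧
      x < (10 : Int) ^ (Nat.digits 10 x.toNat).length := by
  set L := (Nat.digits 10 x.toNat).length with hL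
  have hne : Nat.digits 10 x.toNat ≠ [] := Nat.digits_ne_nil_iff_ne_zero.mpr (by omega)
  have hL1 : 1 ≤ L := by
    rcases h : Nat.digits 10 x.toNat with _ | _
    · exact absurd h hne
    · rw [hL, h]; simp
  have hup : x.toNat < 10 ^ L := Nat.lt_base_pow_length_digits (by norm_num)
  have hlo : ¬ x.toNat < 10 ^ (L - 1) := by
    intro hcon
    have := (Nat.digits_length_le_iff (by norm_num) x.toNat).mpr hcon
    omega
  constructor
  · have : (10 : Int) ^ (L - 1) = ((10 ^ (L - 1) : Nat) : Int) := by push_cast; ring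
    rw [this]; omega
  · have : (10 : Int) ^ L = ((10 ^ L : Nat) : Int) := by push_cast; ring
    rw [this]; omega
theorem pv_mirrorGo_spec (fuel : Nat) : ∀ (t pal : Int), 0 ≤ t → t < (fuel : Int) → 1 ≤ pal →
    1 ≤ pvMirrorGo fuel pal t ∧
    Nat.digits 10 (pvMirrorGo fuel pal t).toNat
      = (Nat.digits 10 t.toNat).reverse ++ Nat.digits 10 pal.toNat := by
  induction fuel with
  | zero => intro t pal h0 hf hp; simp at hf; omega
  | succ fuel ih =>
    intro t pal h0 hf hp
    by_cases ht : 0 < t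
    · rw [show pvMirrorGo (fuel+1) pal t
          = pvMirrorGo fuel (pal * 10 + PySem.Int.mod t 10) (PySem.Int.floordiv t 10) from by
        simp [pvMirrorGo, ht]]
      have hmod : PySem.Int.mod t 10 = t % 10 := PySem.Int.mod_eq_emod_of_pos (by norm_num)
      have hdivr : PySem.Int.floordiv t 10 = t / 10 := PySem.Int.floordiv_eq_ediv_of_pos (by norm_num)
      have hdd : t / 10 < t := by omega
      have h0' : 0 ≤ t / 10 := by omega
      have hp' : 1 ≤ pal * 10 + PySem.Int.mod t 10 := by
        have : 0 ≤ t % 10 := by omega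
        rw [hmod]; nlinarith
      obtain ⟨ih1, ih2⟩ := ih (t / 10) (pal * 10 + PySem.Int.mod t 10)
        h0' (by omega) hp'
      rw [hdivr]
      refine ⟨ih1, ?_⟩
      rw [ih2]
      -- digits of the new pal
      have hpalnat : (pal * 10 + PySem.Int.mod t 10).toNat = pal.toNat * 10 + (t % 10).toNat := by
        rw [hmod]; omega
      have hdigpal : Nat.digits 10 (pal.toNat * 10 + (t % 10).toNat)
          = (t % 10).toNat :: Nat.digits 10 pal.toNat := by
        rw [Nat.digits_def' (by norm_num : (1:Nat) < 10) (by omega)]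
        congr 1
        · omega
        · congr 1; omega
      -- digits of t
      have hdigt : Nat.digits 10 t.toNat = (t % 10).toNat :: Nat.digits 10 (t / 10).toNat := by
        rw [Nat.digits_def' (by norm_num : (1:Nat) < 10) (by omega)]
        congr 1
        · omega
        · congr 1; omega
      rw [hpalnat, hdigpal, hdigt]
      simp
    · have htz : t = 0 := by omega
      subst htz
      rw [show pvMirrorGo (fuel+1) pal 0 = pal from by simp [pvMirrorGo]]
      exact ⟨hp, by simp⟩
theorem pv_digits_len (w : Nat) (half : Int)
    (hlo : (10 : Int) ^ (w - 1) ≤ half) (hhi : half < (10 : Int) ^ w) :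
    (Nat.digits 10 half.toNat).length = w ∧ 1 ≤ half := by
  have c1 : ((10 ^ (w - 1) : Nat) : Int) ≤ half := by push_cast; exact hlo
  have c2 : half < ((10 ^ w : Nat) : Int) := by push_cast; exact hhi
  have hp1 : (1 : Nat) ≤ 10 ^ (w - 1) := Nat.one_le_pow _ _ (by norm_num)
  have h1 : 1 ≤ half := by omega
  have hb1 : 10 ^ (w - 1) ≤ half.toNat := by omega
  have hb2 : half.toNat < 10 ^ w := by omega
  have hle : (Nat.digits 10 half.toNat).length ≤ w :=
    (Nat.digits_length_le_iff (by norm_num) _).mpr hb2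
  have hgt : ¬ (Nat.digits 10 half.toNat).length ≤ w - 1 := by
    intro hcon
    have := (Nat.digits_length_le_iff (by norm_num) half.toNat).mp hcon
    omega
  have hwpos : 1 ≤ w := by
    by_contra hcon
    have hw0 : w = 0 := by omega
    rw [hw0] at hb2
    simp at hb2
    omega
  exact ⟨by omega, h1⟩
theorem pv_mirror_digits (w : Nat) (half : Int)
    (hlo : (10 : Int) ^ (w - 1) ≤ half) (hhi : half < (10 : Int) ^ w) :
    1 ≤ pvMirrorGo half.toNat half (PySem.Int.floordiv half 10) ∧
    Nat.digits 10 (pvMirrorGo half.toNat half (PySem.Int.floordiv half 10)).toNat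
      = (Nat.digits 10 half.toNat).tail.reverse ++ Nat.digits 10 half.toNat := by
  obtain ⟨hlen, h1⟩ := pv_digits_len w half hlo hhi
  have hdivr : PySem.Int.floordiv half 10 = half / 10 := PySem.Int.floordiv_eq_ediv_of_pos (by norm_num)
  have h0' : 0 ≤ half / 10 := by omega
  have hfu : half / 10 < (half.toNat : Int) := by omega
  obtain ⟨s1, s2⟩ := pv_mirrorGo_spec half.toNat (PySem.Int.floordiv half 10) half
    (by omega) (by omega) h1
  refine ⟨s1, ?_⟩
  rw [s2, hdivr]
  have htail : (Nat.digits 10 half.toNat).tail = Nat.digits 10 (half.toNat / 10) := by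
    rw [Nat.digits_def' (by norm_num : (1:Nat) < 10) (by omega : 0 < half.toNat)]
    simp
  have harg : (half / 10).toNat = half.toNat / 10 := by omega
  rw [htail, harg]
theorem pv_mirror_props (w : Nat) (half : Int)
    (hlo : (10 : Int) ^ (w - 1) ≤ half) (hhi : half < (10 : Int) ^ w) :
    pvIsPal (pvMirrorGo half.toNat half (PySem.Int.floordiv half 10)) = true ∧
    (Nat.digits 10 (pvMirrorGo half.toNat half (PySem.Int.floordiv half 10)).toNat).length
      = 2 * w - 1 ∧
    1 ≤ pvMirrorGo half.toNat half (PySem.Int.floordiv half 10) := by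
  obtain ⟨hlen, h1⟩ := pv_digits_len w half hlo hhi
  obtain ⟨hm1, hmd⟩ := pv_mirror_digits w half hlo hhi
  have hw : 1 ≤ w := by
    by_contra hcon
    have : w = 0 := by omega
    rw [this] at hlo hhi
    simp at hlo hhi
    omega
  rcases hds : Nat.digits 10 half.toNat with _ | ⟨a, t⟩
  · rw [hds] at hlen; simp at hlen; omega
  · rw [hds] at hmd
    have hlt : t.length = w - 1 := by rw [hds] at hlen; simp at hlen; omega
    have hes : (t.reverse ++ a :: t).reverse = t.reverse ++ a :: t := by
      simp [List.reverse_cons]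
    have heslen : (t.reverse ++ a :: t).length = 2 * w - 1 := by
      simp [hlt]; omega
    simp only [List.tail_cons] at hmd
    refine ⟨?_, by rw [hmd]; exact heslen, hm1⟩
    simp only [pvIsPal, Bool.and_eq_true, beq_iff_eq]
    rw [hmd, heslen]
    exact ⟨hes, by omega⟩
theorem pv_mirror_val (w : Nat) (half : Int)
    (hlo : (10 : Int) ^ (w - 1) ≤ half) (hhi : half < (10 : Int) ^ w) :
    ∃ r : Nat, r < 10 ^ (w - 1) ∧
      (pvMirrorGo half.toNat half (PySem.Int.floordiv half 10)).toNat
        = r + 10 ^ (w - 1) * half.toNat := by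
  obtain ⟨hlen, h1⟩ := pv_digits_len w half hlo hhi
  obtain ⟨hm1, hmd⟩ := pv_mirror_digits w half hlo hhi
  have hlt : (Nat.digits 10 half.toNat).tail.reverse.length = w - 1 := by
    simp [List.length_tail, hlen]
  refine ⟨Nat.ofDigits 10 (Nat.digits 10 half.toNat).tail.reverse, ?_, ?_⟩
  · have hb : ∀ x ∈ (Nat.digits 10 half.toNat).tail.reverse, x < 10 := by
      intro x hx
      rw [List.mem_reverse] at hx
      exact Nat.digits_lt_base (by norm_num) (List.mem_of_mem_tail hx)
    have hofd := Nat.ofDigits_lt_base_pow_length' (b := 8) hb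
    norm_num at hofd
    rw [hlen] at hofd
    exact hofd
  · conv_lhs => rw [← Nat.ofDigits_digits 10
      (pvMirrorGo half.toNat half (PySem.Int.floordiv half 10)).toNat]
    rw [hmd, Nat.ofDigits_append]
    rw [hlt, Nat.ofDigits_digits]
theorem pv_mirror_mono (w : Nat) (h1 h2 : Int)
    (hlo1 : (10 : Int) ^ (w - 1) ≤ h1) (hhi1 : h1 < (10 : Int) ^ w)
    (hlo2 : (10 : Int) ^ (w - 1) ≤ h2) (hhi2 : h2 < (10 : Int) ^ w) (hlt : h1 < h2) :
    pvMirrorGo h1.toNat h1 (PySem.Int.floordiv h1 10)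
      < pvMirrorGo h2.toNat h2 (PySem.Int.floordiv h2 10) := by
  obtain ⟨r1, hr1, hv1⟩ := pv_mirror_val w h1 hlo1 hhi1
  obtain ⟨r2, hr2, hv2⟩ := pv_mirror_val w h2 hlo2 hhi2
  obtain ⟨-, hp1⟩ := pv_digits_len w h1 hlo1 hhi1
  obtain ⟨-, hp2⟩ := pv_digits_len w h2 hlo2 hhi2
  obtain ⟨hm1, -⟩ := pv_mirror_digits w h1 hlo1 hhi1
  obtain ⟨hm2, -⟩ := pv_mirror_digits w h2 hlo2 hhi2
  have hnat : h1.toNat < h2.toNat := by omega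
  have key : r1 + 10 ^ (w - 1) * h1.toNat < r2 + 10 ^ (w - 1) * h2.toNat := by
    have step : 10 ^ (w - 1) * (h1.toNat + 1) ≤ 10 ^ (w - 1) * h2.toNat :=
      Nat.mul_le_mul_left _ (by omega)
    have : r1 + 10 ^ (w - 1) * h1.toNat < 10 ^ (w - 1) * (h1.toNat + 1) := by
      rw [Nat.mul_add]
      omega
    omega
  omega
theorem pv_exists_half (x : Int) (w : Nat) (hw : 1 ≤ w) (hpal : pvIsPal x = true) (hx : 1 ≤ x)
    (hlen : (Nat.digits 10 x.toNat).length = 2 * w - 1) :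
    ∃ half : Int, (10 : Int) ^ (w - 1) ≤ half ∧ half < (10 : Int) ^ w ∧
      pvMirrorGo half.toNat half (PySem.Int.floordiv half 10) = x := by
  simp only [pvIsPal, Bool.and_eq_true, beq_iff_eq] at hpal
  obtain ⟨hrev, -⟩ := hpal
  set es := Nat.digits 10 x.toNat with hes
  have hne : es ≠ [] := Nat.digits_ne_nil_iff_ne_zero.mpr (by omega)
  -- the upper half of the digits
  set hd := Nat.ofDigits 10 (es.drop (w - 1)) with hhd
  have hdropne : es.drop (w - 1) ≠ [] := by
    intro hcon
    have := congrArg List.length hcon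
    simp [hlen] at this
    omega
  have hdig : Nat.digits 10 hd = es.drop (w - 1) := by
    refine Nat.digits_ofDigits 10 (by norm_num) _ ?_ ?_
    · intro d hdmem
      exact Nat.digits_lt_base (by norm_num) (List.mem_of_mem_drop hdmem)
    · intro h
      rw [List.getLast_drop]
      exact Nat.getLast_digit_ne_zero 10 (by omega)
  have hdlen : (Nat.digits 10 hd).length = w := by
    rw [hdig]
    simp [hlen]
    omega
  -- bounds on hd
  have hd0 : hd ≠ 0 := by
    have hne' : Nat.digits 10 hd ≠ [] := by rw [hdig]; exact hdropne
    exact Nat.digits_ne_nil_iff_ne_zero.mp hne'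
  have hbounds := pv_len_bounds (hd : Int) (by omega)
  rw [Int.toNat_natCast, hdlen] at hbounds
  refine ⟨(hd : Int), hbounds.1, hbounds.2, ?_⟩
  obtain ⟨hm1, hmd⟩ := pv_mirror_digits w (hd : Int) hbounds.1 hbounds.2
  have hsub : Nat.digits 10 ((hd : Int)).toNat = List.drop (w - 1) es := by
    rw [Int.toNat_natCast, hdig]
  rw [hsub] at hmd
  have htails : (es.drop (w - 1)).tail = es.drop w := by
    rw [List.tail_drop]
    congr 1
    omega
  have htake : es.take (w - 1) = (es.drop w).reverse := by
    calc es.take (w - 1) = es.reverse.take (w - 1) := by rw [hrev]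
      _ = (es.drop (es.length - (w - 1))).reverse := List.take_reverse
      _ = (es.drop w).reverse := by rw [hlen]; congr 2; omega
  have hfin : Nat.digits 10 (pvMirrorGo (hd : Int).toNat (hd : Int)
      (PySem.Int.floordiv (hd : Int) 10)).toNat = es := by
    rw [hmd, htails, ← htake]
    exact List.take_append_drop (w - 1) es
  have hvals : (pvMirrorGo (hd : Int).toNat (hd : Int)
      (PySem.Int.floordiv (hd : Int) 10)).toNat = x.toNat := by
    have := congrArg (Nat.ofDigits 10) hfin
    rwa [Nat.ofDigits_digits, hes, Nat.ofDigits_digits] at this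
  omega

-- ---- B's loop structure ----
theorem pv_fold_block (N : Int) (f : Int → Int) : ∀ (l : List Int) (init : List Int),
    l.foldl (fun acc half => if f half ≤ N then acc ++ [f half] else acc) init
      = init ++ (l.filter (fun half => decide (f half ≤ N))).map f := by
  intro l
  induction l with
  | nil => intro init; simp
  | cons a l ih =>
    intro init
    simp only [List.foldl_cons, List.filter_cons]
    by_cases h : f a ≤ N
    · simp only [h, if_pos, decide_true, ih]
      simp
    · simp only [if_neg h]
      rw [ih]
      simp [h]

theorem pv_altLoop_acc (number : Int) : ∀ (fuel : Nat) (width : Int) (acc : List Int),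
    pvAltLoop fuel number width acc = acc ++ pvAltLoop fuel number width [] := by
  intro fuel
  induction fuel with
  | zero => intro width acc; simp [pvAltLoop]
  | succ fuel ih =>
    intro width acc
    simp only [pvAltLoop]
    split_ifs with h
    · rw [pv_fold_block number _ _ acc, pv_fold_block number _ _ []]
      rw [ih _ (acc ++ _), ih _ ([] ++ _)]
      simp
    · simp
theorem pv_block_mem (number width : Int) (hw : 1 ≤ width) (x : Int) :
    (x ∈ ((PySem.List.pyRange ((10 : Int) ^ (width - 1).toNat) ((10 : Int) ^ width.toNat) 1).filter
        (fun half => decide (pvMirrorGo half.toNat half (PySem.Int.floordiv half 10) ≤ number))).map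
        (fun half => pvMirrorGo half.toNat half (PySem.Int.floordiv half 10)))
      ↔ (pvIsPal x = true ∧ 1 ≤ x ∧ x ≤ number ∧
          ((Nat.digits 10 x.toNat).length : Int) = 2 * width - 1) := by
  have hw1 : (width - 1).toNat = width.toNat - 1 := by omega
  set w := width.toNat with hwdef
  have hwge : 1 ≤ w := by omega
  constructor
  · intro hx
    obtain ⟨half, hmem, heq⟩ := List.mem_map.mp hx
    obtain ⟨hrange, hdec⟩ := List.mem_filter.mp hmem
    obtain ⟨hlo, hhi⟩ := PySem.List.mem_pyRange_one.mp hrange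
    rw [hw1] at hlo
    obtain ⟨hp1, hp2, hp3⟩ := pv_mirror_props w half hlo hhi
    rw [heq] at hp1 hp2 hp3
    refine ⟨hp1, hp3, ?_, ?_⟩
    · rw [← heq]; exact decide_eq_true_eq.mp hdec
    · rw [hp2]; omega
  · rintro ⟨hpal, hx1, hxn, hlen⟩
    have hlenN : (Nat.digits 10 x.toNat).length = 2 * w - 1 := by omega
    obtain ⟨half, hlo, hhi, heq⟩ := pv_exists_half x w hwge hpal hx1 hlenN
    apply List.mem_map.mpr
    refine ⟨half, List.mem_filter.mpr ⟨PySem.List.mem_pyRange_one.mpr ⟨by rw [hw1]; exact hlo, hhi⟩, by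
      rw [heq]; simpa using hxn⟩, heq⟩
theorem pv_altLoop_mem (number : Int) : ∀ (fuel : Nat) (width : Int), 1 ≤ width →
    (number + 1 - width).toNat < fuel →
    ∀ x, x ∈ pvAltLoop fuel number width [] ↔
      (pvIsPal x = true ∧ 1 ≤ x ∧ x ≤ number ∧
        2 * width - 1 ≤ ((Nat.digits 10 x.toNat).length : Int)) := by
  intro fuel
  induction fuel with
  | zero => intro width h1 h2 x; omega
  | succ fuel ih =>
    intro width h1 hfu x
    have hpowcast : ((10 ^ (2 * width - 2).toNat : Nat) : Int) = (10 : Int) ^ (2 * width - 2).toNat := by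
      push_cast; ring
    simp only [pvAltLoop]
    by_cases hcond : (10 : Int) ^ (2 * width - 2).toNat ≤ number
    · rw [if_pos hcond]
      rw [pv_fold_block number _ _ []]
      rw [pv_altLoop_acc]
      simp only [List.nil_append, List.mem_append]
      have hwle := pv_le_ten_pow width
      rw [ih (width + 1) (by omega) (by omega) x]
      rw [pv_block_mem number width h1 x]
      constructor
      · rintro (⟨hp, h2, h3, h4⟩ | ⟨hp, h2, h3, h4⟩)
        · exact ⟨hp, h2, h3, by omega⟩
        · exact ⟨hp, h2, h3, by omega⟩
      · rintro ⟨hp, h2, h3, h4⟩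
        have hpar : (Nat.digits 10 x.toNat).length % 2 = 1 := by
          have := hp
          simp only [pvIsPal, Bool.and_eq_true, beq_iff_eq] at this
          exact this.2
        rcases (by omega : ((Nat.digits 10 x.toNat).length : Int) = 2 * width - 1 ∨
            2 * (width + 1) - 1 ≤ ((Nat.digits 10 x.toNat).length : Int)) with hc | hc
        · exact Or.inl ⟨hp, h2, h3, hc⟩
        · exact Or.inr ⟨hp, h2, h3, hc⟩
    · rw [if_neg hcond]
      simp only [List.not_mem_nil, false_iff]
      rintro ⟨hp, h2, h3, h4⟩
      obtain ⟨hlb, -⟩ := pv_len_bounds x h2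
      have hmono : (10 : Int) ^ (2 * width - 2).toNat ≤ (10 : Int) ^ ((Nat.digits 10 x.toNat).length - 1) := by
        apply pow_le_pow_right₀ (by norm_num)
        omega
      omega
theorem pv_altLoop_sorted (number : Int) : ∀ (fuel : Nat) (width : Int), 1 ≤ width →
    (pvAltLoop fuel number width []).Pairwise (· < ·) ∧
    ∀ x ∈ pvAltLoop fuel number width [], (10 : Int) ^ (2 * width - 2).toNat ≤ x := by
  intro fuel
  induction fuel with
  | zero => intro width h1; simp [pvAltLoop]
  | succ fuel ih =>
    intro width h1
    simp only [pvAltLoop]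
    by_cases hcond : (10 : Int) ^ (2 * width - 2).toNat ≤ number
    · rw [if_pos hcond, pv_fold_block number _ _ [], pv_altLoop_acc]
      simp only [List.nil_append]
      have hw1 : (width - 1).toNat = width.toNat - 1 := by omega
      set w := width.toNat with hwdef
      have hwge : 1 ≤ w := by omega
      obtain ⟨ihp, ihb⟩ := ih (width + 1) (by omega)
      -- bounds of block elements
      have hblock : ∀ x, x ∈ ((PySem.List.pyRange ((10 : Int) ^ (width - 1).toNat)
          ((10 : Int) ^ width.toNat) 1).filter
          (fun half => decide (pvMirrorGo half.toNat half (PySem.Int.floordiv half 10) ≤ number))).map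
          (fun half => pvMirrorGo half.toNat half (PySem.Int.floordiv half 10)) →
          (10 : Int) ^ (2 * width - 2).toNat ≤ x ∧ x < (10 : Int) ^ (2 * width - 1).toNat := by
        intro x hx
        obtain ⟨hp, hx1, -, hlen⟩ := (pv_block_mem number width h1 x).mp hx
        obtain ⟨hlb, hub⟩ := pv_len_bounds x hx1
        constructor
        · have he : (Nat.digits 10 x.toNat).length - 1 = (2 * width - 2).toNat := by omega
          rwa [he] at hlb
        · have he : (Nat.digits 10 x.toNat).length = (2 * width - 1).toNat := by omega
          rwa [he] at hub
      constructor
      · rw [List.pairwise_append]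
        refine ⟨?_, ihp, ?_⟩
        · rw [List.pairwise_map]
          apply List.Pairwise.imp_of_mem ?_
            ((PySem.List.pairwise_lt_pyRange_one _ _).filter _)
          intro a b ha hb hlt
          have hma := PySem.List.mem_pyRange_one.mp (List.mem_of_mem_filter ha)
          have hmb := PySem.List.mem_pyRange_one.mp (List.mem_of_mem_filter hb)
          rw [hw1] at hma hmb
          exact pv_mirror_mono w a b hma.1 hma.2 hmb.1 hmb.2 hlt
        · intro a ha b hb
          have h1a := (hblock a ha).2
          have h2b := ihb b hb
          have hmono : (10 : Int) ^ (2 * width - 1).toNat ≤ (10 : Int) ^ (2 * (width + 1) - 2).toNat := by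
            apply pow_le_pow_right₀ (by norm_num)
            omega
          omega
      · intro x hx
        rcases List.mem_append.mp hx with hx | hx
        · exact (hblock x hx).1
        · have := ihb x hx
          have hmono : (10 : Int) ^ (2 * width - 2).toNat ≤ (10 : Int) ^ (2 * (width + 1) - 2).toNat := by
            apply pow_le_pow_right₀ (by norm_num)
            omega
          omega
    · rw [if_neg hcond]
      simp
theorem pv_sorted_ext : ∀ (l₁ l₂ : List Int), l₁.Pairwise (· < ·) → l₂.Pairwise (· < ·) →
    (∀ x, x ∈ l₁ ↔ x ∈ l₂) → l₁ = l₂ := by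
  intro l₁
  induction l₁ with
  | nil =>
    intro l₂ _ _ h
    cases l₂ with
    | nil => rfl
    | cons b bs => have := (h b).mpr (by simp); simp at this
  | cons a as ih =>
    intro l₂ h1 h2 hmem
    cases l₂ with
    | nil => have := (hmem a).mp (by simp); simp at this
    | cons b bs =>
      rw [List.pairwise_cons] at h1 h2
      have hab : a = b := by
        rcases List.mem_cons.mp ((hmem a).mp (by simp)) with h | h
        · exact h
        · rcases List.mem_cons.mp ((hmem b).mpr (by simp)) with h' | h'
          · omega
          · have := h2.1 a h
            have := h1.1 b h'
            omega
      subst hab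
      congr 1
      apply ih bs h1.2 h2.2
      intro x
      constructor
      · intro hx
        have hax := h1.1 x hx
        rcases List.mem_cons.mp ((hmem x).mp (by simp [hx])) with h | h
        · omega
        · exact h
      · intro hx
        have hax := h2.1 x hx
        rcases List.mem_cons.mp ((hmem x).mpr (by simp [hx])) with h | h
        · omega
        · exact h

theorem pv_B_filter (number : Int) :
    create_odd_number_method_alt number = (PySem.List.pyRange 1 (number + 1) 1).filter pvIsPal := by
  unfold create_odd_number_method_alt
  apply pv_sorted_ext
  · exact (pv_altLoop_sorted number _ 1 le_rfl).1
  · exact (PySem.List.pairwise_lt_pyRange_one _ _).filter _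
  · intro x
    rw [pv_altLoop_mem number (number.toNat + 1) 1 le_rfl (by omega) x]
    rw [List.mem_filter, PySem.List.mem_pyRange_one]
    constructor
    · rintro ⟨hp, h1, h2, h3⟩
      exact ⟨⟨h1, by omega⟩, hp⟩
    · rintro ⟨⟨h1, h2⟩, hp⟩
      refine ⟨hp, h1, by omega, ?_⟩
      have hne : Nat.digits 10 x.toNat ≠ [] := Nat.digits_ne_nil_iff_ne_zero.mpr (by omega)
      have hl1 : 1 ≤ (Nat.digits 10 x.toNat).length := by
        rcases h : Nat.digits 10 x.toNat with _ | _
        · exact absurd h hne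
        · simp
      omega

-- ===== VERDICT (by name: the statement is the Claim_ definition above) =====
theorem create_odd_number_method_spec : Claim_equal_create_odd_number_method := by
  intro number _
  unfold Spec_create_odd_number_method
  rw [pv_A_filter, pv_B_filter]
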